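-- pv_equiv track=rewrite | github.com/sachin-qgem/PBMC-reproducible | src/02_analysis_scripts/P02_matrix_construction.py | decode_barcode
-- ===== SOURCE A (Python) =====
-- def decode_barcode(n, length=16):
--     """
--     Decodes a 2-bit integer back to ACGT string.
--     10x Mapping: A=0, C=1, G=2, T=3
--     Note: The length depends on Chemistry (V2=16bp, V1=14bp).
--     We will auto-detect or default to 16.
--     """
--     # 10x uses a specific bit-packing.
--     # Usually: A=00, C=01, G=10, T=11 (or similar map).
--     # Standard: {0:'A', 1:'C', 2:'G', 3:'T'}
--     bases = ['A', 'C', 'G', 'T']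
--
--     # We construct the string in reverse order of division
--     seq = []
--     for _ in range(length):
--         remainder = n % 4
--         seq.append(bases[remainder])
--         n = n // 4
--
--     return "".join(reversed(seq))
-- ===== SOURCE B (Python) =====
-- def decode_barcode(n, length=16):
--     """Divide-and-conquer: decode the high half and low half of the packed
--     integer recursively and concatenate, instead of a linear digit loop."""
--     bases = "ACGT"
--
--     def go(m, k):
--         if k <= 0:
--             return ""
--         if k == 1:
--             return bases[m & 3]
--         h = k // 2
--         lo = k - h
--         return go(m >> (2 * lo), h) + go(m, lo)
--
--     return go(n, length)
-- ===== Notes on version B (the rewrite author's own statement) =====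
-- stated objective: alternative
-- what changed: B decodes by binary divide-and-conquer: it recursively decodes the high length//2 bases from the shifted integer and the low length-length//2 bases, concatenating the two halves, instead of A's linear divmod-by-4 loop that mutates n and reverses the collected list.
import Mathlib
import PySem

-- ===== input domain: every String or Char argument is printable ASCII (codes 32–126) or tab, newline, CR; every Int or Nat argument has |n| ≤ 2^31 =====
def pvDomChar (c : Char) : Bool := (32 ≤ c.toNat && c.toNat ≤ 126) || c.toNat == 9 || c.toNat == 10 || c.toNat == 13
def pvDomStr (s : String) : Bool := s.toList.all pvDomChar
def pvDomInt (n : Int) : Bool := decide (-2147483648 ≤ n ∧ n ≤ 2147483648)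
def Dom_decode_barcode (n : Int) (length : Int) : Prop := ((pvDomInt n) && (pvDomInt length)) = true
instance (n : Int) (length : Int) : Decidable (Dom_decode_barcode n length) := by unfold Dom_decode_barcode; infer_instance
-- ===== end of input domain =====

-- B decodes by binary divide-and-conquer over the base positions (high half ++ low half),
-- instead of A's linear floordiv/mod-by-4 loop followed by a reversal (alternative decomposition, same cost).


-- ===== PORT A =====
-- loop body of A: append bases[n % 4], replace n by n // 4 (bases[m%4] never raises: 0 ≤ m%4 < 4)
def pvStepA (st : List String × Int) (_i : Int) : List String × Int :=
  (st.1 ++ [(PySem.List.pyGet? ["A", "C", "G", "T"] (PySem.Int.mod st.2 4)).getD ""],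
   PySem.Int.floordiv st.2 4)

def decode_barcode (n : Int) (length : Int) : String :=
  PySem.Str.join "" (((PySem.List.pyRange 0 length 1).foldl pvStepA ([], n)).1).reverse

-- ===== PORT B =====
-- go(m, k): bases[m & 3] is a one-character string in Python, ported as String.singleton of the
-- indexed character; Python's m >> (2*lo) is Lean's >>> on the (nonnegative) shift amount.
def pvGoB (m : Int) (k : Int) : String :=
  if k ≤ 0 then ""
  else if k = 1 then String.singleton ((PySem.Str.pyGet? "ACGT" (PySem.Int.band m 3)).getD ' ')
  else
    let h := PySem.Int.floordiv k 2
    let lo := k - h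
    pvGoB (m >>> (2 * lo).toNat) h ++ pvGoB m lo
termination_by k.toNat
decreasing_by
  · have h2 : PySem.Int.floordiv k 2 = k / 2 :=
      PySem.Int.floordiv_eq_ediv_of_pos (by norm_num)
    omega
  · have h2 : PySem.Int.floordiv k 2 = k / 2 :=
      PySem.Int.floordiv_eq_ediv_of_pos (by norm_num)
    omega

def decode_barcode_alt (n : Int) (length : Int) : String := pvGoB n length

-- ===== PRECONDITION & SPEC =====
def Spec_decode_barcode (n : Int) (length : Int) (out : String) : Prop := out = decode_barcode_alt n length
instance (n : Int) (length : Int) (out : String) : Decidable (Spec_decode_barcode n length out) := by unfold Spec_decode_barcode; infer_instance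

-- ===== CLAIM (what is proved, stated in full; the proofs are below) =====
def Claim_equal_decode_barcode : Prop := ∀ (n : Int) (length : Int), Dom_decode_barcode n length → Spec_decode_barcode n length (decode_barcode n length)

-- ===== LEMMAS AND PROOFS =====

-- the base string A appends at one loop step
def pvDig (m : Int) : String :=
  (PySem.List.pyGet? ["A", "C", "G", "T"] (PySem.Int.mod m 4)).getD ""

-- the base string for bit-position (exponent) e
def pvDig2 (n : Int) (e : Nat) : String :=
  (PySem.List.pyGet? ["A", "C", "G", "T"] (PySem.Int.band (n >>> (2 * e)) 3)).getD ""

-- the base CHARACTER for bit-position (exponent) e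
def pvCDig (n : Int) (e : Nat) : Char :=
  (PySem.Str.pyGet? "ACGT" (PySem.Int.band (n >>> (2 * e)) 3)).getD ' '

-- the character list both programs produce, most-significant base first
def pvMsb (m : Int) (L : Nat) : List Char :=
  (List.range L).map (fun i => pvCDig m (L - 1 - i))

-- the list A's loop accumulates (low base first)
def pvSeq : Int → Nat → List String
  | _, 0 => []
  | n, (L + 1) => pvDig n :: pvSeq (PySem.Int.floordiv n 4) L

theorem pv_band3 (n : Int) : PySem.Int.band n 3 = PySem.Int.mod n 4 := by
  have key : ∀ m : Nat, m &&& 3 = m % 4 := by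
    intro m; have := Nat.and_two_pow_sub_one_eq_mod m 2; norm_num at this; omega
  unfold PySem.Int.band PySem.Int.mod
  cases n with
  | ofNat m =>
    simp only [Int.ofNat_eq_natCast]
    rw [if_pos (by positivity), if_pos (by norm_num)]
    norm_num [Int.toNat_natCast]
    rw [show ((3:Int).toNat) = 3 from rfl, key m, Int.fmod_eq_emod]
    simp
  | negSucc m =>
    rw [if_neg (by simp [Int.negSucc_not_nonneg]), if_pos (by norm_num)]
    rw [show ((3:Int).toNat) = 3 from rfl]
    rw [show (-Int.negSucc m - 1).toNat = m by simp [Int.negSucc_eq]]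
    rw [Nat.land_comm, key m, Int.fmod_eq_emod]
    simp [Int.negSucc_eq]
    omega

theorem pv_band3_bounds (n : Int) : 0 ≤ PySem.Int.band n 3 ∧ PySem.Int.band n 3 < 4 := by
  rw [pv_band3]
  unfold PySem.Int.mod
  have h1 := Int.emod_nonneg n (show (4:Int) ≠ 0 by norm_num)
  have h2 := Int.emod_lt_of_pos n (show (0:Int) < 4 by norm_num)
  rw [Int.fmod_eq_emod, if_pos (Or.inl (show (0:Int) ≤ 4 by norm_num))]
  constructor <;> omega

theorem pv_floordiv_shift (n : Int) : PySem.Int.floordiv n 4 = n >>> (2 : Nat) := by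
  rw [PySem.Int.floordiv_eq_ediv_of_pos (by norm_num), Int.shiftRight_eq_div_pow]
  norm_num

theorem pv_shift_shift (n : Int) (a b : Nat) : n >>> a >>> b = n >>> (a + b) := by
  simp only [Int.shiftRight_eq_div_pow, pow_add]
  exact Int.ediv_ediv_of_nonneg (by positivity)

theorem pv_shift_zero (n : Int) : n >>> (0 : Nat) = n := by
  simp [Int.shiftRight_eq_div_pow]

theorem pv_dig2_zero (n : Int) : pvDig2 n 0 = pvDig n := by
  unfold pvDig2 pvDig
  norm_num [pv_band3, pv_shift_zero]

theorem pv_dig2_succ (n : Int) (e : Nat) :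
    pvDig2 (PySem.Int.floordiv n 4) e = pvDig2 n (e + 1) := by
  unfold pvDig2
  rw [pv_floordiv_shift, pv_shift_shift]
  rw [show 2 + 2 * e = 2 * (e + 1) from by omega]

-- the string digit and the char digit agree (both index the same four bases)
theorem pv_dig2_toList (n : Int) (e : Nat) : (pvDig2 n e).toList = [pvCDig n e] := by
  unfold pvDig2 pvCDig
  obtain ⟨h1, h2⟩ := pv_band3_bounds (n >>> (2 * e))
  set r := PySem.Int.band (n >>> (2 * e)) 3 with hr
  interval_cases r <;> decide

theorem pv_cdig_shift (m : Int) (lo e : Nat) :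
    pvCDig (m >>> (2 * lo)) e = pvCDig m (e + lo) := by
  unfold pvCDig
  rw [pv_shift_shift, show 2 * lo + 2 * e = 2 * (e + lo) from by omega]

theorem pv_foldA (l : List Int) : ∀ (acc : List String) (n : Int),
    (l.foldl pvStepA (acc, n)).1 = acc ++ pvSeq n l.length := by
  induction l with
  | nil => intro acc n; simp [pvSeq]
  | cons x xs ih =>
    intro acc n
    simp only [List.foldl_cons, List.length_cons, pvSeq]
    rw [show pvStepA (acc, n) x =
        (acc ++ [pvDig n], PySem.Int.floordiv n 4) from rfl, ih]
    simp

theorem pv_seq_eq (L : Nat) : ∀ n : Int, pvSeq n L = (List.range L).map (pvDig2 n) := by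
  induction L with
  | zero => intro n; simp [pvSeq]
  | succ L ih =>
    intro n
    rw [List.range_succ_eq_map]
    simp only [pvSeq, List.map_cons, List.map_map, pv_dig2_zero]
    rw [ih (PySem.Int.floordiv n 4)]
    congr 1
    apply List.map_congr_left
    intro j _
    exact pv_dig2_succ n j

theorem pv_rev_map_range (f : Nat → String) (L : Nat) :
    ((List.range L).map f).reverse = (List.range L).map (fun k => f (L - 1 - k)) := by
  induction L generalizing f with
  | zero => simp
  | succ L ih =>
    conv_lhs => rw [List.range_succ]
    rw [List.range_succ_eq_map]
    simp only [List.map_append, List.map_cons, List.map_map, List.reverse_append,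
      List.reverse_cons, List.reverse_nil, List.map_nil]
    rw [ih]
    simp only [List.nil_append, List.cons_append]
    congr 1
    · norm_num
      intro a _
      congr 1
      omega

-- A's output, as a character list: the msb-first base characters
theorem pv_A_toList (n : Int) (length : Int) :
    (decode_barcode n length).toList = pvMsb n length.toNat := by
  unfold decode_barcode
  rw [PySem.List.pyRange_one]
  have hL : (length - 0).toNat = length.toNat := by omega
  rw [hL]
  set L := length.toNat with hLdef
  rw [pv_foldA, List.nil_append, List.length_map, List.length_range, pv_seq_eq,
    pv_rev_map_range]
  rw [PySem.Str.toList_join]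
  simp only [List.map_map, Function.comp_def]
  have : ((List.range L).map fun k => (pvDig2 n (L - 1 - k)).toList)
      = (List.range L).map (fun k => [pvCDig n (L - 1 - k)]) := by
    apply List.map_congr_left; intro k _; exact pv_dig2_toList n (L - 1 - k)
  rw [this, show ((List.range L).map fun k => [pvCDig n (L - 1 - k)])
      = ((List.range L).map fun k => pvCDig n (L - 1 - k)).map (fun c => [c]) from by
        simp [List.map_map, Function.comp_def]]
  rw [show ("" : String).toList = [] from rfl, PySem.Chars.join_nil_singletons]
  rfl

-- the msb-first list splits at any cut: high digits come from the shifted integer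
theorem pv_msb_add (m : Int) (h lo : Nat) :
    pvMsb m (h + lo) = pvMsb (m >>> (2 * lo)) h ++ pvMsb m lo := by
  unfold pvMsb
  rw [List.range_add, List.map_append, List.map_map]
  congr 1
  · apply List.map_congr_left
    intro i hi
    rw [List.mem_range] at hi
    rw [pv_cdig_shift]
    congr 1
    omega
  · apply List.map_congr_left
    intro j hj
    rw [List.mem_range] at hj
    simp only [Function.comp]
    congr 1
    omega

-- B's recursion produces the same msb-first character list
theorem pv_goB_toList : ∀ (K : Nat) (m k : Int), k.toNat = K →
    (pvGoB m k).toList = pvMsb m k.toNat := by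
  intro K
  induction K using Nat.strong_induction_on with
  | _ K ih =>
    intro m k hK
    unfold pvGoB
    split_ifs with h0 h1
    · rw [show k.toNat = 0 from by omega]
      simp [pvMsb]
    · subst h1
      simp only [String.toList_singleton]
      unfold pvMsb pvCDig
      rw [show (1:Int).toNat = 1 from rfl]
      simp
    · have hdiv : PySem.Int.floordiv k 2 = k / 2 :=
        PySem.Int.floordiv_eq_ediv_of_pos (by norm_num)
      simp only []
      rw [String.toList_append]
      rw [ih (PySem.Int.floordiv k 2).toNat (by omega) _ _ rfl,
          ih (k - PySem.Int.floordiv k 2).toNat (by omega) _ _ rfl]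
      rw [show (2 * (k - PySem.Int.floordiv k 2)).toNat
            = 2 * (k - PySem.Int.floordiv k 2).toNat from by omega,
          show k.toNat = (PySem.Int.floordiv k 2).toNat
            + (k - PySem.Int.floordiv k 2).toNat from by omega,
          pv_msb_add]

-- ===== VERDICT (by name: the statement is the Claim_ definition above) =====
theorem decode_barcode_spec : Claim_equal_decode_barcode := by
  intro n length _dom
  unfold Spec_decode_barcode decode_barcode_alt
  rw [← String.toList_inj, pv_A_toList, pv_goB_toList length.toNat n length rfl]
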